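-- pv_equiv track=rewrite | github.com/johndolgov/EPAM-Python-Courses | Task #L3.1.py | from_string_to_int
-- ===== SOURCE A (Python) =====
-- def from_string_to_int(str):
--     '''This function returns
--     unique integer value for string
--     :param - str
--     :type - string
--     :return - integer
--     :type - int
--     '''
--     if not str:
--         return 0
--     else:
--         a = ord(str[-1])
--         power = 0
--         while a >= 10:
--             a = a//10
--             power += 1
--         power += 1
--         return ord(str[-1]) + from_string_to_int(str[:len(str)-1])*(10)**(power)
-- ===== SOURCE B (Python) =====
-- def from_string_to_int(str):
--     result = 0
--     for c in str:
--         result = result * 10 ** len(f'{ord(c)}') + ord(c)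
--     return result
-- ===== Notes on version B (the rewrite author's own statement) =====
-- stated objective: simpler
-- what changed: Replaces A's right-to-left recursion (with slicing and a while-loop that divides the ord value by 10 to count its digits) by a single left-to-right loop that shifts the accumulator by len(f'{ord(c)}') decimal digits and adds ord(c).
import Mathlib
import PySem

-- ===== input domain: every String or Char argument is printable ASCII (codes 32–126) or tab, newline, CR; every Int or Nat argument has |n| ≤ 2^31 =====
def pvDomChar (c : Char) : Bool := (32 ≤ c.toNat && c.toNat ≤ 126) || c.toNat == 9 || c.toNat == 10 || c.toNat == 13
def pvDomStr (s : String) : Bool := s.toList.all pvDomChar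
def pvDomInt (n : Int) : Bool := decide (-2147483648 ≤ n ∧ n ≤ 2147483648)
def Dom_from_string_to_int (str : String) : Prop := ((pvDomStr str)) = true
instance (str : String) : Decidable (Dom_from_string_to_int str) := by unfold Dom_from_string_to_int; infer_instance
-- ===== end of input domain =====

-- B replaces A's right-to-left recursion (slices + digit-counting while loop) by one
-- left-to-right accumulator loop shifting by the decimal length of each ord value (simpler).

-- ===== PORT A =====
-- the 'while a >= 10: a = a//10; power += 1' loop of A
def pvPowLoopA (a power : Int) : Int :=
  if 10 ≤ a then pvPowLoopA (PySem.Int.floordiv a 10) (power + 1) else power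
termination_by a.toNat
decreasing_by
  rw [PySem.Int.floordiv_eq_ediv_of_pos (by norm_num : (0:Int) < 10)]
  omega

def from_string_to_int_go (l : List Char) : Int :=
  if h : l = [] then 0
  else
    let a : Int := ((l.getLast h).toNat : Int)          -- a = ord(str[-1])
    let power : Int := pvPowLoopA a 0 + 1               -- while loop, then power += 1
    ((l.getLast h).toNat : Int) +
      from_string_to_int_go l.dropLast * 10 ^ power.toNat
termination_by l.length
decreasing_by
  have := List.length_pos_iff.mpr h
  simp [List.length_dropLast]
  omega

def from_string_to_int (str : String) : Int := from_string_to_int_go str.toList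

-- ===== PORT B =====
def from_string_to_int_alt (str : String) : Int :=
  str.toList.foldl
    (fun result c =>
      result * 10 ^ (PySem.Int.toChars ((c.toNat : Int))).length + (c.toNat : Int))
    0

-- ===== PRECONDITION & SPEC =====
def Spec_from_string_to_int (str : String) (out : Int) : Prop := out = from_string_to_int_alt str
instance (str : String) (out : Int) : Decidable (Spec_from_string_to_int str out) := by unfold Spec_from_string_to_int; infer_instance

-- ===== CLAIM (what is proved, stated in full; the proofs are below) =====
def Claim_equal_from_string_to_int : Prop := ∀ (str : String), Dom_from_string_to_int str → Spec_from_string_to_int str (from_string_to_int str)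

-- ===== LEMMAS AND PROOFS =====

-- A's while loop computes power + log10 a (for positive a)
theorem pvPowLoopA_eq_log (n : Nat) (p : Int) (hn : 0 < n) :
    pvPowLoopA (n : Int) p = p + (Nat.log 10 n : Int) := by
  induction n using Nat.strong_induction_on generalizing p with
  | _ n ih =>
    rw [pvPowLoopA]
    by_cases h : 10 ≤ n
    · rw [if_pos (by exact_mod_cast h)]
      rw [show PySem.Int.floordiv (n : Int) 10 = ((n / 10 : Nat) : Int) from
        PySem.Int.floordiv_natCast n 10]
      rw [ih (n / 10) (by omega) (p + 1) (by omega)]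
      rw [Nat.log_of_one_lt_of_le (by norm_num) h]
      push_cast; ring
    · rw [if_neg (by exact_mod_cast h)]
      rw [Nat.log_of_lt (by omega)]
      simp

-- str(n) has log10 n + 1 characters on the domain's char codes
theorem toChars_len_small : ∀ n : Nat, n < 127 → 0 < n →
    (PySem.Int.toChars (n : Int)).length = Nat.log 10 n + 1 := by
  have h : ∀ n : Nat, n < 127 → 0 < n →
      (Nat.toDigits 10 n).length = Nat.log 10 n + 1 := by decide
  intro n h1 h2
  rw [show PySem.Int.toChars (n : Int) = Nat.toDigits 10 n by
    simp [PySem.Int.toChars]]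
  exact h n h1 h2

theorem perChar (c : Char) (hc : pvDomChar c = true) :
    (pvPowLoopA ((c.toNat : Int)) 0 + 1).toNat
      = (PySem.Int.toChars ((c.toNat : Int))).length := by
  have hb : 0 < c.toNat ∧ c.toNat < 127 := by
    simp [pvDomChar] at hc; omega
  rw [pvPowLoopA_eq_log c.toNat 0 hb.1, toChars_len_small c.toNat hb.2 hb.1]
  omega

theorem go_eq_foldl (l : List Char) (hl : l.all pvDomChar = true) :
    from_string_to_int_go l =
      l.foldl (fun result c =>
        result * 10 ^ (PySem.Int.toChars ((c.toNat : Int))).length + (c.toNat : Int)) 0 := by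
  induction l using List.reverseRecOn with
  | nil => simp [from_string_to_int_go]
  | append_singleton l c ih =>
    have hne : l ++ [c] ≠ [] := by simp
    have hcd : pvDomChar c = true := by simp [List.all_append] at hl; exact hl.2
    have hld : l.all pvDomChar = true := by simp [List.all_append] at hl; simpa using hl.1
    rw [from_string_to_int_go, dif_neg hne]
    simp only [List.getLast_concat, List.dropLast_concat]
    rw [ih hld, List.foldl_append, perChar c hcd]
    simp [List.foldl]
    ring

-- ===== VERDICT (by name: the statement is the Claim_ definition above) =====
theorem from_string_to_int_spec : Claim_equal_from_string_to_int := by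
  intro s hd
  unfold Spec_from_string_to_int from_string_to_int from_string_to_int_alt
  exact go_eq_foldl s.toList hd
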